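-- pv_equiv track=rewrite | github.com/jskim-research/PythonAlgorithm | programmers/level3/BadUser.py | solution
-- ===== SOURCE A (Python) =====
-- def match(s1, s2):  # s2가 차단 아이디로 생각
--     if len(s1) != len(s2):
--         return False
--     for c1, c2 in zip(s1, s2):
--         if c2 != '*' and c1 != c2:
--             return False
--     return True
--
-- def merge(l1, l2):
--     ret = []
--     for s1 in l1:
--         for s2 in l2:
--             s = s1 + s2
--             if len(s) == len(set(s)):
--                 ret.append(s)
--     return ret
--
-- def solution(user_id, banned_id):
--     ban_case = []
--     for b_id in banned_id:
--         tmp = []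
--         for u_id in user_id:
--             if match(u_id, b_id):
--                 tmp.append([u_id])
--         ban_case.append(tmp)
--
--     base = ban_case[0]
--     for i in range(1, len(ban_case)):
--         base = merge(base, ban_case[i])
--
--     # sorted => 순서 고정, len(set) = len => unique pair만
--     answer = set(["".join(sorted(b)) for b in base])
--     return len(answer)
-- ===== SOURCE B (Python) =====
-- def solution(user_id, banned_id):
--     # candidate users per banned pattern ('*' wildcard, same length)
--     cand = [[u for u in user_id
--              if len(u) == len(b) and all(cb == '*' or cu == cb for cu, cb in zip(u, b))]
--             for b in banned_id]
--     keys = set()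
--
--     def go(i, chosen):
--         if i == len(cand):
--             keys.add("".join(sorted(chosen)))
--         else:
--             for u in cand[i]:
--                 if u not in chosen:
--                     chosen.append(u)
--                     go(i + 1, chosen)
--                     chosen.pop()
--
--     go(0, [])
--     return len(keys)
-- ===== Notes on version B (the rewrite author's own statement) =====
-- stated objective: simpler
-- what changed: Replaces the iterative pairwise merge of ever-growing combination lists (merge building concatenated lists and re-checking distinctness with len(set(..)) at every step) by a direct backtracking DFS over the per-pattern candidate lists that keeps one 'chosen' stack, prunes duplicates by membership, and inserts each complete group's sorted-join key straight into the result set.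
-- crash fix: On empty banned_id A raises IndexError (ban_case[0]); B returns 1 (the single empty group). — e.g. on solution(["a"], []): A raises IndexError, B returns 1
import Mathlib
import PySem

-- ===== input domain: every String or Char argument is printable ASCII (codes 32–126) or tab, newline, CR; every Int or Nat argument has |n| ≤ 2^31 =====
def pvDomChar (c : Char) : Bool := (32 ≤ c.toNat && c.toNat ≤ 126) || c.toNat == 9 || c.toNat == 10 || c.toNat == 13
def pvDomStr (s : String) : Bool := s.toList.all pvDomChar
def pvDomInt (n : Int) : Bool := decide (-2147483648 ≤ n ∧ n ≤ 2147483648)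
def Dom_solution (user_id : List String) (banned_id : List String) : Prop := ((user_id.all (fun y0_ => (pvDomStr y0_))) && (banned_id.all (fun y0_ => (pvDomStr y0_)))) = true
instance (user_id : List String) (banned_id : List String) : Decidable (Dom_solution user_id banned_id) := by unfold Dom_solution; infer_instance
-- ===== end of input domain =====

-- B replaces A's iterative pairwise merge of combination lists by a backtracking DFS
-- over the per-pattern candidate lists (simpler decomposition, same asymptotic cost).


-- ===== PORT A =====
-- match(s1, s2): loop over zip with early return
def pyMatchLoop : List (Char × Char) → Bool
  | [] => true
  | (c1, c2) :: rest => if c2 ≠ '*' ∧ c1 ≠ c2 then false else pyMatchLoop rest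

def pyMatch (s1 s2 : String) : Bool :=
  if s1.toList.length ≠ s2.toList.length then false
  else pyMatchLoop (s1.toList.zip s2.toList)

-- merge(l1, l2): nested append loops with len(s) == len(set(s)) pruning
def pyMerge (l1 l2 : List (List String)) : List (List String) :=
  l1.foldl (fun ret s1 =>
    l2.foldl (fun ret s2 =>
      let s := s1 ++ s2
      if s.length = (PySem.Set.ofList s).length then ret ++ [s] else ret) ret) []

def solution (user_id : List String) (banned_id : List String) : Int :=
  let ban_case := banned_id.foldl (fun bc b_id =>
    bc ++ [user_id.foldl (fun tmp u_id => if pyMatch u_id b_id then tmp ++ [[u_id]] else tmp) []]) []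
  -- ban_case[0] raises IndexError when banned_id = []; excluded by Pre_solution
  let base0 := (ban_case[0]?).getD []
  let base := (PySem.List.pyRange 1 (ban_case.length : Int) 1).foldl
    (fun base i => pyMerge base (PySem.List.pyGetD ban_case i [])) base0
  let answer := PySem.Set.ofList
    (base.map (fun b => PySem.Str.join "" (PySem.List.sorted b (fun x => x) false)))
  (answer.length : Int)

-- ===== PORT B =====
-- matches(u, b): length check plus all(...) over zip
def altMatch (u b : String) : Bool :=
  u.toList.length == b.toList.length &&
    (u.toList.zip b.toList).all (fun p => p.2 == '*' || p.1 == p.2)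

-- "".join(sorted(chosen))
def altKey (chosen : List String) : String :=
  PySem.Str.join "" (PySem.List.sorted chosen (fun x => x) false)

-- go(i, chosen): DFS over cand; the foldl is the inner 'for u in cand[i]' loop
def altGo : List (List String) → List String → PySem.Set String → PySem.Set String
  | [], chosen, keys => PySem.Set.add keys (altKey chosen)
  | c :: rest, chosen, keys =>
      c.foldl (fun ks u => if chosen.contains u then ks else altGo rest (chosen ++ [u]) ks) keys

def solution_alt (user_id : List String) (banned_id : List String) : Int :=
  let cand := banned_id.map (fun b => user_id.filter (fun u => altMatch u b))
  let keys := altGo cand [] PySem.Set.empty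
  (keys.length : Int)

-- ===== PRECONDITION & SPEC =====
-- Pre_ excludes only banned_id = [], where A raises IndexError on ban_case[0].
def Pre_solution (user_id : List String) (banned_id : List String) : Prop := banned_id ≠ []
instance (user_id : List String) (banned_id : List String) : Decidable (Pre_solution user_id banned_id) := by unfold Pre_solution; infer_instance

def pvWitness_solution : List String × List String := (["ab", "cb"], ["*b"])

-- On empty banned_id A raises IndexError (ban_case[0]); B returns 1 (the single empty group).
def Raises_solution (user_id : List String) (banned_id : List String) : Prop := banned_id = []
instance (user_id : List String) (banned_id : List String) : Decidable (Raises_solution user_id banned_id) := by unfold Raises_solution; infer_instance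
def pvRaiseWitness_solution : List String × List String := (["a"], [])
def pvRaiseWitnessOut_solution : Int := 1

def Spec_solution (user_id : List String) (banned_id : List String) (out : Int) : Prop := out = solution_alt user_id banned_id
instance (user_id : List String) (banned_id : List String) (out : Int) : Decidable (Spec_solution user_id banned_id out) := by unfold Spec_solution; infer_instance

-- ===== CLAIM (what is proved, stated in full; the proofs are below) =====
def Claim_equal_solution : Prop := ∀ (user_id : List String) (banned_id : List String), Dom_solution user_id banned_id → Pre_solution user_id banned_id → Spec_solution user_id banned_id (solution user_id banned_id)
def Claim_raises_solution : Prop := (∀ (user_id : List String) (banned_id : List String), Dom_solution user_id banned_id → Raises_solution user_id banned_id → ¬ Pre_solution user_id banned_id) ∧ (Dom_solution (pvRaiseWitness_solution.1) (pvRaiseWitness_solution.2) ∧ Raises_solution (pvRaiseWitness_solution.1) (pvRaiseWitness_solution.2) ∧ solution_alt (pvRaiseWitness_solution.1) (pvRaiseWitness_solution.2) = pvRaiseWitnessOut_solution)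

-- ===== LEMMAS AND PROOFS =====

-- all duplicate-free extensions of `chosen` by one pick per remaining candidate list, in DFS order
def extTree : List (List String) → List String → List (List String)
  | [], chosen => [chosen]
  | c :: rest, chosen => c.flatMap (fun u => if chosen.contains u then [] else extTree rest (chosen ++ [u]))

-- the two match functions agree
theorem pyMatchLoop_eq_all (l : List (Char × Char)) :
    pyMatchLoop l = l.all (fun p => p.2 == '*' || p.1 == p.2) := by
  induction l with
  | nil => rfl
  | cons p rest ih =>
    obtain ⟨c1, c2⟩ := p
    simp only [pyMatchLoop, List.all_cons, ih]
    by_cases h2 : c2 = '*' <;> by_cases h1 : c1 = c2 <;> simp [h1, h2]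

theorem pyMatch_eq_altMatch (u b : String) : pyMatch u b = altMatch u b := by
  unfold pyMatch altMatch
  rw [pyMatchLoop_eq_all]
  by_cases h : u.toList.length = b.toList.length
  · rw [if_neg (not_not_intro h)]
    have hb : (u.toList.length == b.toList.length) = true := beq_iff_eq.mpr h
    rw [hb, Bool.true_and]
  · rw [if_pos h]
    have hb : (u.toList.length == b.toList.length) = false := beq_eq_false_iff_ne.mpr h
    rw [hb, Bool.false_and]

-- ofList is a sublist of its argument
theorem foldl_add_sublist {α : Type} [BEq α] (xs s : List α) :
    List.Sublist (xs.foldl PySem.Set.add s) (s ++ xs) := by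
  induction xs generalizing s with
  | nil => simp
  | cons x xs ih =>
    simp only [List.foldl_cons]
    refine (ih (PySem.Set.add s x)).trans ?_
    unfold PySem.Set.add
    split
    · exact List.Sublist.append_left (List.sublist_cons_self x xs) s
    · have hx : (s ++ [x]) ++ xs = s ++ x :: xs := by simp
      rw [hx]

theorem ofList_sublist {α : Type} [BEq α] (xs : List α) :
    List.Sublist (PySem.Set.ofList xs) xs := by
  rw [PySem.Set.ofList_eq_foldl]
  simpa using foldl_add_sublist xs []

-- len(s) == len(set(s)) is exactly Nodup
theorem len_ofList_eq_iff (s : List String) :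
    ((PySem.Set.ofList s).length = s.length) ↔ s.Nodup := by
  constructor
  · intro h
    have he := (ofList_sublist s).eq_of_length h
    rw [← he]
    exact PySem.Set.nodup_ofList s
  · intro h
    have hperm : (PySem.Set.ofList s).Perm s := by
      rw [List.perm_ext_iff_of_nodup (PySem.Set.nodup_ofList s) h]
      intro a
      exact PySem.Set.mem_ofList s a
    exact hperm.length_eq

-- the distinctness test on s1 ++ [u] for a duplicate-free s1
theorem cond_iff (s1 : List String) (h : s1.Nodup) (u : String) :
    ((s1 ++ [u]).length = (PySem.Set.ofList (s1 ++ [u])).length) ↔ u ∉ s1 := by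
  rw [eq_comm, len_ofList_eq_iff, ← List.concat_eq_append, List.nodup_concat]
  exact ⟨fun hh => hh.1, fun hh => ⟨hh, h⟩⟩

-- A's inner merge loop over singleton candidates, seed s1 duplicate-free
theorem merge_inner_eq (s1 : List String) (h : s1.Nodup) (c : List String)
    (ret : List (List String)) :
    (c.map (fun u => [u])).foldl
        (fun ret s2 => if (s1 ++ s2).length = (PySem.Set.ofList (s1 ++ s2)).length
                       then ret ++ [s1 ++ s2] else ret) ret
      = ret ++ (c.filter (fun u => !s1.contains u)).map (fun u => s1 ++ [u]) := by
  induction c generalizing ret with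
  | nil => simp
  | cons u c ih =>
    simp only [List.map_cons, List.foldl_cons, List.filter_cons]
    by_cases hu : u ∈ s1
    · rw [if_neg (by rw [cond_iff s1 h u]; exact not_not_intro hu)]
      have hc : (!s1.contains u) = false := by simp [hu]
      rw [hc, ih]
      simp
    · rw [if_pos ((cond_iff s1 h u).mpr hu)]
      have hc : (!s1.contains u) = true := by simp [hu]
      rw [hc, ih]
      simp

-- merge with singleton-wrapped candidates on a duplicate-free accumulator
theorem pyMerge_sing (l1 : List (List String)) (c : List String)
    (h : ∀ s ∈ l1, s.Nodup) :
    pyMerge l1 (c.map (fun u => [u])) =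
      l1.flatMap (fun s1 => (c.filter (fun u => !s1.contains u)).map (fun u => s1 ++ [u])) := by
  unfold pyMerge
  refine Eq.trans (PySem.List.foldl_congr_mem l1 _
      (fun ret s1 => ret ++ (c.filter (fun u => !s1.contains u)).map (fun u => s1 ++ [u])) []
      (fun acc s1 hs1 => merge_inner_eq s1 (h s1 hs1) c acc)) ?_
  exact PySem.List.foldl_append_eq_flatMap _ l1 []

-- the filter-map form of extTree's one-level expansion
theorem extTree_cons (c : List String) (rest : List (List String)) (chosen : List String) :
    extTree (c :: rest) chosen =
      ((c.filter (fun u => !chosen.contains u)).map (fun u => chosen ++ [u])).flatMap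
        (extTree rest) := by
  simp only [extTree]
  induction c with
  | nil => simp
  | cons u c ih =>
    simp only [List.flatMap_cons, List.filter_cons]
    by_cases hu : chosen.contains u = true
    · rw [if_pos hu]
      have : (!chosen.contains u) = false := by rw [hu]; rfl
      rw [this, ih]
      simp
    · rw [if_neg hu]
      have : (!chosen.contains u) = true := by simp at hu; simp [hu]
      rw [this, ih]
      simp

-- A's merge fold computes the flatMap of extTree on a duplicate-free accumulator
theorem foldl_merge_eq (cands : List (List String)) (acc : List (List String))
    (h : ∀ s ∈ acc, s.Nodup) :
    (cands.map (fun c => c.map (fun u => [u]))).foldl pyMerge acc =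
      acc.flatMap (fun s1 => extTree cands s1) := by
  induction cands generalizing acc with
  | nil => simp [extTree]
  | cons c rest ih =>
    simp only [List.map_cons, List.foldl_cons]
    rw [pyMerge_sing acc c h, ih _ (by
      intro s hs
      simp only [List.mem_flatMap, List.mem_map, List.mem_filter] at hs
      obtain ⟨s1, hs1, u, ⟨hu, hnc⟩, rfl⟩ := hs
      rw [← List.concat_eq_append, List.nodup_concat]
      refine ⟨?_, h s1 hs1⟩
      simpa using hnc)]
    rw [List.flatMap_assoc]
    congr 1
    funext s1
    exact (extTree_cons c rest s1).symm

-- B's DFS folds the keys of extTree into the set, in DFS order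
theorem altGo_eq (cands : List (List String)) (chosen : List String) (keys : PySem.Set String) :
    altGo cands chosen keys = ((extTree cands chosen).map altKey).foldl PySem.Set.add keys := by
  induction cands generalizing chosen keys with
  | nil => simp [altGo, extTree]
  | cons c rest ih =>
    simp only [altGo, extTree]
    induction c generalizing keys with
    | nil => simp
    | cons u c ihc =>
      simp only [List.foldl_cons, List.flatMap_cons]
      by_cases hu : chosen.contains u = true
      · rw [if_pos hu, if_pos hu]
        simpa using ihc _
      · rw [if_neg hu, if_neg hu]
        rw [List.map_append, List.foldl_append, ← ih]
        exact ihc _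

-- ===== VERDICT (by name: the statement is the Claim_ definition above) =====
theorem solution_spec : Claim_equal_solution := by
  intro user_id banned_id _ hpre
  unfold Spec_solution solution solution_alt
  obtain ⟨b0, brest, rfl⟩ : ∃ b0 brest, banned_id = b0 :: brest := by
    cases banned_id with
    | nil => exact absurd rfl hpre
    | cons b0 brest => exact ⟨b0, brest, rfl⟩
  simp only [PySem.List.foldl_append_if, pyMatch_eq_altMatch, List.nil_append]
  rw [PySem.List.foldl_append_singleton_eq_map
      (f := fun b_id => (List.filter (fun u_id => altMatch u_id b_id) user_id).map (fun u => [u]))]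
  rw [List.nil_append]
  have hmm : (b0 :: brest).map
      (fun b_id => (List.filter (fun u_id => altMatch u_id b_id) user_id).map (fun u => [u]))
      = ((b0 :: brest).map (fun b => user_id.filter (fun u => altMatch u b))).map
          (fun c => c.map (fun u => [u])) := by
    rw [List.map_map]
    rfl
  rw [hmm]
  set C : List (List String) := (b0 :: brest).map (fun b => user_id.filter (fun u => altMatch u b)) with hC
  obtain ⟨c0, crest, hCc⟩ : ∃ c0 crest, C = c0 :: crest := by
    rw [hC]; exact ⟨_, _, rfl⟩
  rw [hCc]
  rw [PySem.List.foldl_pyRange_pyGetD' _ _ pyMerge _ (by norm_num : (0:Int) ≤ 1)]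
  simp only [List.map_cons, List.getElem?_cons_zero, Option.getD_some, Int.toNat_one,
    List.drop_succ_cons, List.drop_zero]
  rw [foldl_merge_eq crest (c0.map (fun u => [u])) (by
    intro s hs
    simp only [List.mem_map] at hs
    obtain ⟨u, _, rfl⟩ := hs
    exact List.nodup_singleton u)]
  rw [altGo_eq, PySem.Set.ofList_eq_foldl]
  have hempty : (PySem.Set.empty : PySem.Set String) = [] := rfl
  rw [hempty]
  have harg : List.flatMap (fun s1 => extTree crest s1) (List.map (fun u => [u]) c0)
      = extTree (c0 :: crest) [] := by
    rw [List.flatMap_map]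
    simp [extTree]
  rw [harg]
  rfl

@[simp]
theorem solution_raises : Claim_raises_solution := by
  unfold Claim_raises_solution
  exact ⟨fun _ _ _ h => by simpa [Pre_solution] using h, by decide⟩
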